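-- pv_equiv track=rewrite | github.com/baguiar-20/Deteccao-de-Plagio | 2. Modelos Ri/Modelo BM25/funPreGeral.py | preencheTermos
-- ===== SOURCE A (Python) =====
-- def preencheTermos(termos_colecao_c, list_c):
--     termos_number = {}
--     for i in termos_colecao_c:
--         termos_number[i] = None
--     for i in termos_number:
--         cont = 0
--         for j in list_c:
--             for x in j.items():
--                 if i in x[1]:
--                     cont +=1
--                     termos_number[i] = cont
--     return termos_number
-- ===== SOURCE B (Python) =====
-- def preencheTermos(termos_colecao_c, list_c):
--     counts = {}
--     for doc in list_c:
--         for toks in doc.values():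
--             for t in set(toks):
--                 counts[t] = counts.get(t, 0) + 1
--     return {t: counts.get(t) for t in termos_colecao_c}
-- ===== Notes on version B (the rewrite author's own statement) =====
-- stated objective: faster
-- what changed: Instead of scanning every document's items once per term (A's nested per-term loop), B makes a single pass over all items building a per-term counter dict (one increment per distinct token of each item), then answers each term by one dict lookup.
import Mathlib
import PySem

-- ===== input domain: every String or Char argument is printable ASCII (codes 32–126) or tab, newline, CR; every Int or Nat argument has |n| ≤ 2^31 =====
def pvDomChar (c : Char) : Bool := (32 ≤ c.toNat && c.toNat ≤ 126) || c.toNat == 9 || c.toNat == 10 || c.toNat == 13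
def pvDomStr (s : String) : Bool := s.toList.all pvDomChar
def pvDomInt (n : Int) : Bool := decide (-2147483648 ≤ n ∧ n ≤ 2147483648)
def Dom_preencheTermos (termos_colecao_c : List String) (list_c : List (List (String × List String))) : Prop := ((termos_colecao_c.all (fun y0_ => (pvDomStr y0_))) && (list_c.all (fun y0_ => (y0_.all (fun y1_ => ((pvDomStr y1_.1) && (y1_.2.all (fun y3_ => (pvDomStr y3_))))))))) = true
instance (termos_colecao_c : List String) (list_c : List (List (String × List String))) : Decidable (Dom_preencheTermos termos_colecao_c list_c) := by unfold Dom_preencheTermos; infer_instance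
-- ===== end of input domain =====

-- B replaces A's per-term rescans of all documents by one counting pass over the items plus a lookup per term (objective: faster).

-- ===== PORT A =====
def preencheTermos (termos_colecao_c : List String) (list_c : List (List (String × List String))) : List (String × Option Int) :=
  let d0 : PySem.Dict String (Option Int) :=
    termos_colecao_c.foldl (fun d i => d.insert i none) PySem.Dict.empty
  let d : PySem.Dict String (Option Int) :=
    d0.keys.foldl (fun d i =>
      (list_c.foldl (fun (s : Int × PySem.Dict String (Option Int)) j =>
          j.foldl (fun s x =>
            if x.2.contains i then (s.1 + 1, s.2.insert i (some (s.1 + 1))) else s) s)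
        (0, d)).2)
    d0
  d.items

-- ===== PORT B =====
def preencheTermos_alt (termos_colecao_c : List String) (list_c : List (List (String × List String))) : List (String × Option Int) :=
  let counts : PySem.Dict String Int :=
    list_c.foldl (fun c j =>
      j.foldl (fun c x =>
        (PySem.Set.ofList x.2).foldl (fun c t => c.modify t 0 (· + 1)) c) c)
      PySem.Dict.empty
  (PySem.List.dedup termos_colecao_c).map (fun t => (t, counts.get? t))

-- ===== PRECONDITION & SPEC =====
def Spec_preencheTermos (termos_colecao_c : List String) (list_c : List (List (String × List String))) (out : List (String × Option Int)) : Prop := out = preencheTermos_alt termos_colecao_c list_c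
instance (termos_colecao_c : List String) (list_c : List (List (String × List String))) (out : List (String × Option Int)) : Decidable (Spec_preencheTermos termos_colecao_c list_c out) := by unfold Spec_preencheTermos; infer_instance

-- ===== CLAIM (what is proved, stated in full; the proofs are below) =====
def Claim_equal_preencheTermos : Prop := ∀ (termos_colecao_c : List String) (list_c : List (List (String × List String))), Dom_preencheTermos termos_colecao_c list_c → Spec_preencheTermos termos_colecao_c list_c (preencheTermos termos_colecao_c list_c)

-- ===== LEMMAS AND PROOFS =====


-- the per-term count both programs compute, as a reference value
def pvCnt (list_c : List (List (String × List String))) (t : String) : Int :=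
  (list_c.flatten.countP (fun x => x.2.contains t) : Int)

-- A's inner double loop over list_c for a fixed term i
theorem pvInnerA (i : String) (L : List (String × List String))
    (c : Int) (d : PySem.Dict String (Option Int)) :
    L.foldl (fun s x =>
        if x.2.contains i then (s.1 + 1, s.2.insert i (some (s.1 + 1))) else s) (c, d)
    = (c + (L.countP (fun x => x.2.contains i) : Int),
       if L.countP (fun x => x.2.contains i) = 0 then d
       else d.insert i (some (c + (L.countP (fun x => x.2.contains i) : Int)))) := by
  induction L generalizing c d with
  | nil => simp
  | cons x L ih =>
    simp only [List.foldl_cons]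
    by_cases h : x.2.contains i = true
    · rw [if_pos h, ih, List.countP_cons_of_pos (by simpa using h)]
      have hc : c + 1 + (L.countP (fun x => x.2.contains i) : Int)
          = c + ((L.countP (fun x => x.2.contains i) + 1 : Nat) : Int) := by push_cast; ring
      rcases Nat.eq_zero_or_pos (L.countP (fun x => x.2.contains i)) with h0 | h0
      · rw [if_pos h0, if_neg (by omega), h0] at *
        norm_num
      · rw [if_neg (by omega), if_neg (by omega), PySem.Dict.insert_insert_self, hc]
    · rw [if_neg h, ih, List.countP_cons_of_neg (by simpa using h)]

-- d0: every stored value is none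
theorem pvD0_getD (tcs : List String) (d : PySem.Dict String (Option Int)) (t : String)
    (h : d.getD t none = none) :
    (tcs.foldl (fun d i => d.insert i none) d).getD t none = none := by
  induction tcs generalizing d with
  | nil => exact h
  | cons i tcs ih =>
    refine ih _ ?_
    rw [PySem.Dict.getD_insert]
    split <;> simp [h]

-- outer loop of A after simplification: keys unchanged
theorem pvOuter_keys (g : String → Int) (K : List String) (d : PySem.Dict String (Option Int))
    (h : ∀ k ∈ K, k ∈ d.keys) :
    (K.foldl (fun d i => if g i = 0 then d else d.insert i (some (g i))) d).keys = d.keys := by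
  induction K generalizing d with
  | nil => rfl
  | cons i K ih =>
    simp only [List.foldl_cons]
    have hik : i ∈ d.keys := h i (by simp)
    have hkeys : (if g i = 0 then d else d.insert i (some (g i))).keys = d.keys := by
      split
      · rfl
      · exact PySem.Dict.keys_insert_of_contains _ _ ((PySem.Dict.contains_iff_mem_keys _ _).2 hik)
    rw [ih _ (fun k hk => by rw [hkeys]; exact h k (by simp [hk])), hkeys]

-- outer loop of A: the stored value at t
theorem pvOuter_getD (g : String → Int) (K : List String) (d : PySem.Dict String (Option Int))
    (t : String) :
    (K.foldl (fun d i => if g i = 0 then d else d.insert i (some (g i))) d).getD t none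
    = if t ∈ K ∧ g t ≠ 0 then some (g t) else d.getD t none := by
  induction K generalizing d with
  | nil => simp
  | cons i K ih =>
    simp only [List.foldl_cons]
    rw [ih]
    by_cases hK : t ∈ K ∧ g t ≠ 0
    · rw [if_pos hK, if_pos ⟨by simp [hK.1], hK.2⟩]
    · rw [if_neg hK]
      by_cases hti : t = i
      · subst hti
        by_cases h0 : g t = 0
        · simp [h0]
        · simp [h0, PySem.Dict.getD_insert_self]
      · have : (if g i = 0 then d else d.insert i (some (g i))).getD t none = d.getD t none := by
          split
          · rfl
          · exact PySem.Dict.getD_insert_of_ne _ _ _ hti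
        rw [this]
        have : ¬(t ∈ i :: K ∧ g t ≠ 0) := by
          rintro ⟨hm, hg⟩
          rcases List.mem_cons.1 hm with h | h
          · exact hti h
          · exact hK ⟨h, hg⟩
        rw [if_neg this]

-- B's counting pass over the flattened items: stored count at t
theorem pvCounts_getD (P : List (String × List String)) (c : PySem.Dict String Int) (t : String) :
    (P.foldl (fun c x => (PySem.Set.ofList x.2).foldl (fun c t => c.modify t 0 (· + 1)) c) c).getD t 0
    = c.getD t 0 + (P.countP (fun x => x.2.contains t) : Int) := by
  induction P generalizing c with
  | nil => simp
  | cons x P ih =>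
    simp only [List.foldl_cons]
    rw [ih, PySem.Dict.getD_foldl_modify_add_one]
    have hcnt : (PySem.Set.ofList x.2).count t = if x.2.contains t then 1 else 0 := by
      by_cases hm : t ∈ x.2
      · rw [List.count_eq_one_of_mem (PySem.Set.nodup_ofList x.2) ((PySem.Set.mem_ofList x.2 t).2 hm),
            if_pos (by simpa using hm)]
      · rw [List.count_eq_zero.2 (fun hc => hm ((PySem.Set.mem_ofList x.2 t).1 hc)),
            if_neg (by simpa using hm)]
    rw [hcnt]
    by_cases hp : x.2.contains t = true
    · rw [List.countP_cons_of_pos (by simpa using hp), if_pos hp]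
      push_cast; ring
    · rw [List.countP_cons_of_neg (by simpa using hp), if_neg hp]
      simp
-- B's counting pass: which keys are present
theorem pvCounts_contains (P : List (String × List String)) (c : PySem.Dict String Int) (t : String) :
    (P.foldl (fun c x => (PySem.Set.ofList x.2).foldl (fun c t => c.modify t 0 (· + 1)) c) c).contains t
    = (c.contains t || P.any (fun x => x.2.contains t)) := by
  induction P generalizing c with
  | nil => simp
  | cons x P ih =>
    simp only [List.foldl_cons, List.any_cons]
    rw [ih]
    have : ∀ (s : List String) (c : PySem.Dict String Int),
        (s.foldl (fun c t => c.modify t 0 (· + 1)) c).contains t = (c.contains t || s.contains t) := by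
      intro s
      induction s with
      | nil => simp
      | cons u s ihs =>
        intro c
        simp only [List.foldl_cons]
        rw [ihs, PySem.Dict.contains_modify]
        rw [show (u::s).contains t = ((t == u) || s.contains t) from rfl,
            show (t == u) = decide (t = u) from Bool.beq_eq_decide_eq t u,
            Bool.or_assoc, Bool.or_left_comm]
    rw [this]
    have hm : (PySem.Set.ofList x.2).contains t = x.2.contains t := by
      simp [PySem.Set.mem_ofList]
    rw [show List.contains (PySem.Set.ofList x.2) t = x.2.contains t from hm, Bool.or_assoc]

-- B's counter characterised through get?
theorem pvCounts_get? (lc : List (List (String × List String))) (t : String) :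
    (lc.foldl (fun c j =>
      j.foldl (fun c x =>
        (PySem.Set.ofList x.2).foldl (fun c t => c.modify t 0 (· + 1)) c) c)
      (PySem.Dict.empty : PySem.Dict String Int)).get? t
    = if pvCnt lc t = 0 then none else some (pvCnt lc t) := by
  rw [← List.foldl_flatten]
  have hgd := pvCounts_getD lc.flatten PySem.Dict.empty t
  have hct := pvCounts_contains lc.flatten PySem.Dict.empty t
  simp only [PySem.Dict.getD_empty, PySem.Dict.contains_empty, Bool.false_or, zero_add] at hgd hct
  by_cases h0 : pvCnt lc t = 0
  · rw [if_pos h0]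
    rw [PySem.Dict.get?_eq_none_iff_contains, hct]
    have : lc.flatten.countP (fun x => x.2.contains t) = 0 := by
      unfold pvCnt at h0; exact_mod_cast h0
    rw [List.any_eq_false]
    intro x hx
    have := (List.countP_eq_zero.1 this) x hx
    simpa using this
  · rw [if_neg h0]
    have hcontains : (List.foldl (fun c x =>
        (PySem.Set.ofList x.2).foldl (fun c t => c.modify t 0 (· + 1)) c)
        (PySem.Dict.empty : PySem.Dict String Int) lc.flatten).contains t = true := by
      rw [hct, List.any_eq_true]
      have : lc.flatten.countP (fun x => x.2.contains t) ≠ 0 := by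
        unfold pvCnt at h0; exact_mod_cast h0
      obtain ⟨x, hx, hp⟩ := List.countP_pos_iff.1 (Nat.pos_of_ne_zero this)
      exact ⟨x, hx, hp⟩
    rw [PySem.Dict.contains_eq_isSome_get?] at hcontains
    obtain ⟨w, hw⟩ := Option.isSome_iff_exists.1 hcontains
    rw [hw]
    have := PySem.Dict.getD_of_get?_eq_some _ 0 hw
    rw [this] at hgd
    unfold pvCnt
    rw [← hgd]

theorem preencheTermos_spec : Claim_equal_preencheTermos := by
  intro tcs lc _
  unfold Spec_preencheTermos preencheTermos preencheTermos_alt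
  simp only []
  have hk0 : (tcs.foldl (fun d i => d.insert i none) (PySem.Dict.empty : PySem.Dict String (Option Int))).keys
      = PySem.Set.ofList tcs := by
    rw [PySem.Dict.keys_foldl_insert (f := fun _ _ => none)]
    rfl
  have hnd0 : (tcs.foldl (fun d i => d.insert i none) (PySem.Dict.empty : PySem.Dict String (Option Int))).keys.Nodup := by
    exact PySem.Dict.nodup_keys_foldl_insert _ _ _ PySem.Dict.nodup_keys_empty
  -- simplify the outer loop body of A
  have hstep : ∀ (d : PySem.Dict String (Option Int)) (i : String),
      (lc.foldl (fun (s : Int × PySem.Dict String (Option Int)) j =>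
          j.foldl (fun s x =>
            if x.2.contains i then (s.1 + 1, s.2.insert i (some (s.1 + 1))) else s) s)
        (0, d)).2
      = if pvCnt lc i = 0 then d else d.insert i (some (pvCnt lc i)) := by
    intro d i
    rw [← List.foldl_flatten, pvInnerA]
    simp only [zero_add, pvCnt, Int.natCast_eq_zero]
  have hA := PySem.List.foldl_congr_mem
      (l := (tcs.foldl (fun (d : PySem.Dict String (Option Int)) i => d.insert i none) PySem.Dict.empty).keys)
      (init := tcs.foldl (fun (d : PySem.Dict String (Option Int)) i => d.insert i none) PySem.Dict.empty)
      (f := fun d i =>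
        (lc.foldl (fun (s : Int × PySem.Dict String (Option Int)) j =>
            j.foldl (fun s x =>
              if x.2.contains i then (s.1 + 1, s.2.insert i (some (s.1 + 1))) else s) s)
          (0, d)).2)
      (g := fun d i => if pvCnt lc i = 0 then d else d.insert i (some (pvCnt lc i)))
      (fun acc x _ => hstep acc x)
  rw [hA]
  have hkeys := pvOuter_keys (pvCnt lc)
      (tcs.foldl (fun d i => d.insert i none) (PySem.Dict.empty : PySem.Dict String (Option Int))).keys
      (tcs.foldl (fun d i => d.insert i none) (PySem.Dict.empty : PySem.Dict String (Option Int))) (fun k hk => hk)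
  rw [PySem.Dict.items_eq_map_keys _ (by rw [hkeys]; exact hnd0) none, hkeys, hk0,
      PySem.List.dedup_eq_ofList]
  refine List.map_congr_left ?_
  intro k hk
  rw [pvOuter_getD, pvCounts_get?]
  have hd0v : (tcs.foldl (fun d i => d.insert i none) (PySem.Dict.empty : PySem.Dict String (Option Int))).getD k none = none :=
    pvD0_getD tcs PySem.Dict.empty k (by simp [PySem.Dict.getD_empty])
  by_cases h0 : pvCnt lc k = 0
  · rw [if_neg (by tauto), if_pos h0, hd0v]
  · rw [if_pos ⟨hk, h0⟩, if_neg h0]
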